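-- pv_equiv track=rewrite | github.com/vetlemknutsen/robot_motion_generation | motion_pipeline/rml/converter.py | _parse_joint_name
-- ===== SOURCE A (Python) =====
-- def _parse_joint_name(name: str) -> tuple:
--     """
--     Parse joint name into (side, joint, rotation) components.
--     E.g., 'RShoulderPitch' -> ('R', 'Shoulder', 'Pitch')
--           'LElbowRoll' -> ('L', 'Elbow', 'Roll')
--           'HeadYaw' -> ('', 'Head', 'Yaw')
--           'arm_1_joint' -> ('', 'arm_1_joint', '')  # unchanged for TIAGo-style names
--     """
--     # Check for side prefix (R or L followed by uppercase)
--     side = ''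
--     if name and name[0] in ('R', 'L') and len(name) > 1 and name[1].isupper():
--         side = name[0]
--         name = name[1:]
--
--     # Find rotation suffix (Roll, Pitch, Yaw)
--     rotation = ''
--     for rot in ('Roll', 'Pitch', 'Yaw'):
--         if name.endswith(rot):
--             rotation = rot
--             name = name[:-len(rot)]
--             break
--
--     return side, name, rotation
-- ===== SOURCE B (Python) =====
-- # B: instead of scanning the three rotation candidates with an explicit loop,
-- # dispatch on the body's last character through a dict built once, then verify.
-- _ROT_BY_LAST = {'l': 'Roll', 'h': 'Pitch', 'w': 'Yaw'}
--
--
-- def _parse_joint_name(name: str) -> tuple: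
--     has_side = len(name) > 1 and name[0] in ('R', 'L') and name[1].isupper()
--     side, body = (name[0], name[1:]) if has_side else ('', name)
--     rot = _ROT_BY_LAST.get(body[-1:], '')
--     if not body.endswith(rot):
--         rot = ''
--     return side, body[:len(body) - len(rot)], rot
-- ===== Notes on version B (the rewrite author's own statement) =====
-- stated objective: alternative
-- what changed: The explicit first-match loop over the three rotation suffixes is replaced by a dict dispatch on the body's last character (built once) followed by a single endswith verification; the side prefix is computed as one boolean instead of a guarded rebinding.
import Mathlib
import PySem

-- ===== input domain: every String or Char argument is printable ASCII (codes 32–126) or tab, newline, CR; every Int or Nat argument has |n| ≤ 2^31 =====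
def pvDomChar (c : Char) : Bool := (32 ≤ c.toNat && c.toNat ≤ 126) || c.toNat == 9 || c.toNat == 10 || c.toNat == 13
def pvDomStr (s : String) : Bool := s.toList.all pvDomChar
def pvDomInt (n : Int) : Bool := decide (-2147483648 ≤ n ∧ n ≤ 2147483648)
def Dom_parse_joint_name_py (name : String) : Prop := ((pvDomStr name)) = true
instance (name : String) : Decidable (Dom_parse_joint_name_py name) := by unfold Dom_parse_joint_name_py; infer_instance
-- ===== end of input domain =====

-- B differs from A only in how it is organised: the rotation suffix is found by a
-- dict dispatch on the body's last character instead of A's first-match loop; the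
-- return values agree on all inputs.

-- ===== PORT A =====
-- for rot in ('Roll','Pitch','Yaw'): if name.endswith(rot): rotation=rot; name=name[:-len(rot)]; break
def pjnRotLoopA (cs : List Char) : List (List Char) → List Char × List Char
  | [] => (cs, [])
  | r :: rs =>
      if PySem.Chars.endswith cs r then
        (PySem.List.slice cs none (some (-(r.length : Int))), r)
      else pjnRotLoopA cs rs

def parse_joint_name_py (name : String) : String × String × String :=
  let cs := name.toList
  -- if name and name[0] in ('R','L') and len(name) > 1 and name[1].isupper():
  let cond : Bool :=
    !cs.isEmpty &&
    (match cs with | c :: _ => c == 'R' || c == 'L' | [] => false) &&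
    decide (1 < cs.length) &&
    (match PySem.List.pyGet? cs 1 with | some c => PySem.Chars.isupper c | none => false)
  let side := if cond then cs.take 1 else []      -- side = name[0] (index in range when cond holds)
  let cs1 := if cond then PySem.List.slice cs (some 1) none else cs   -- name = name[1:]
  let br := pjnRotLoopA cs1 [['R','o','l','l'], ['P','i','t','c','h'], ['Y','a','w']]
  (String.ofList side, String.ofList br.1, String.ofList br.2)

-- ===== PORT B =====
-- _ROT_BY_LAST = {'l': 'Roll', 'h': 'Pitch', 'w': 'Yaw'}
def pjnRotByLast : PySem.Dict (List Char) (List Char) :=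
  ((PySem.Dict.empty.insert ['l'] ['R','o','l','l']).insert ['h'] ['P','i','t','c','h']).insert ['w'] ['Y','a','w']

def parse_joint_name_py_alt (name : String) : String × String × String :=
  let cs := name.toList
  -- has_side = len(name) > 1 and name[0] in ('R','L') and name[1].isupper()
  let hasSide : Bool :=
    decide (1 < cs.length) &&
    (match PySem.List.pyGet? cs 0 with | some c => c == 'R' || c == 'L' | none => false) &&
    (match PySem.List.pyGet? cs 1 with | some c => PySem.Chars.isupper c | none => false)
  -- side, body = (name[0], name[1:]) if has_side else ('', name)
  let side := if hasSide then cs.take 1 else []   -- name[0] (index in range when hasSide holds)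
  let body := if hasSide then PySem.List.slice cs (some 1) none else cs
  -- rot = _ROT_BY_LAST.get(body[-1:], '')
  let rot0 := pjnRotByLast.getD (PySem.List.slice body (some (-1)) none) []
  -- if not body.endswith(rot): rot = ''
  let rot := if PySem.Chars.endswith body rot0 then rot0 else []
  -- return side, body[:len(body) - len(rot)], rot
  (String.ofList side,
   String.ofList (PySem.List.slice body none (some ((body.length : Int) - rot.length))),
   String.ofList rot)

-- ===== PRECONDITION & SPEC =====
def Spec_parse_joint_name_py (name : String) (out : String × String × String) : Prop := out = parse_joint_name_py_alt name
instance (name : String) (out : String × String × String) : Decidable (Spec_parse_joint_name_py name out) := by unfold Spec_parse_joint_name_py; infer_instance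

-- ===== CLAIM (what is proved, stated in full; the proofs are below) =====
def Claim_equal_parse_joint_name_py : Prop := ∀ (name : String), Dom_parse_joint_name_py name → Spec_parse_joint_name_py name (parse_joint_name_py name)

-- ===== LEMMAS AND PROOFS =====

-- a nonempty suffix forces the last character
theorem pjn_endswith_last (bs r : List Char) (c p : Char)
    (h : PySem.Chars.endswith (bs ++ [c]) (r ++ [p]) = true) : p = c := by
  rw [PySem.Chars.endswith_iff] at h
  obtain ⟨t, ht⟩ := h
  have := congrArg List.getLast? ht
  simpa using this

theorem pjn_not_endswith (bs : List Char) (c : Char) (r : List Char) (p : Char)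
    (hne : p ≠ c) : PySem.Chars.endswith (bs ++ [c]) (r ++ [p]) = false := by
  cases h : PySem.Chars.endswith (bs ++ [c]) (r ++ [p])
  · rfl
  · exact absurd (pjn_endswith_last bs r c p h) hne

theorem pjn_endswith_len (body r : List Char)
    (h : PySem.Chars.endswith body r = true) : r.length ≤ body.length := by
  rw [PySem.Chars.endswith_iff] at h
  exact h.length_le

theorem pjn_slice_strip (body : List Char) (k : Nat) (hk : k ≤ body.length) (h1 : 0 < k) :
    PySem.List.slice body none (some (-(k : Int))) =
    PySem.List.slice body none (some ((body.length : Int) - k)) := by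
  rw [PySem.List.slice_to_neg_natCast _ _ h1, PySem.List.slice_to]
  · congr 1; omega
  · omega

theorem pjn_slice_all (xs : List Char) (b : Int) (h : (xs.length : Int) ≤ b) :
    PySem.List.slice xs none (some b) = xs := by
  rw [PySem.List.slice_to]
  · exact List.take_of_length_le (by omega)
  · omega

-- the first-match loop over the three suffixes equals B's last-char dispatch + verify
theorem pjn_rot_eq (body : List Char) :
    pjnRotLoopA body [['R','o','l','l'], ['P','i','t','c','h'], ['Y','a','w']] =
      ((PySem.List.slice body none
        (some ((body.length : Int) -
          (if PySem.Chars.endswith body (pjnRotByLast.getD (PySem.List.slice body (some (-1)) none) [])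
           then pjnRotByLast.getD (PySem.List.slice body (some (-1)) none) [] else []).length))),
       (if PySem.Chars.endswith body (pjnRotByLast.getD (PySem.List.slice body (some (-1)) none) [])
        then pjnRotByLast.getD (PySem.List.slice body (some (-1)) none) [] else [])) := by
  rcases List.eq_nil_or_concat body with rfl | ⟨bs, c, rfl⟩
  · decide
  · simp only [List.concat_eq_append]
    have hlast : PySem.List.slice (bs ++ [c]) (some (-1)) none = [c] := by
      rw [PySem.List.slice_from_neg_one]; simp
    rw [hlast]
    by_cases hw : c = 'w'
    · subst hw
      rw [show pjnRotByLast.getD ['w'] [] = ['Y','a','w'] from by decide]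
      have hR : PySem.Chars.endswith (bs ++ ['w']) ['R','o','l','l'] = false :=
        pjn_not_endswith bs 'w' ['R','o','l'] 'l' (by decide)
      have hP : PySem.Chars.endswith (bs ++ ['w']) ['P','i','t','c','h'] = false :=
        pjn_not_endswith bs 'w' ['P','i','t','c'] 'h' (by decide)
      cases hY : PySem.Chars.endswith (bs ++ ['w']) ['Y','a','w'] with
      | true =>
        have hlen := pjn_endswith_len _ _ hY
        simp only [pjnRotLoopA, hR, hP, hY, Bool.false_eq_true, if_false, if_true]
        rw [pjn_slice_strip _ _ hlen (by decide)]
      | false =>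
        simp only [pjnRotLoopA, hR, hP, hY, Bool.false_eq_true, if_false]
        simp only [List.length_nil, Nat.cast_zero, sub_zero, Prod.mk.injEq]
        exact ⟨(pjn_slice_all _ _ le_rfl).symm, trivial⟩
    · by_cases hh : c = 'h'
      · subst hh
        rw [show pjnRotByLast.getD ['h'] [] = ['P','i','t','c','h'] from by decide]
        have hR : PySem.Chars.endswith (bs ++ ['h']) ['R','o','l','l'] = false :=
          pjn_not_endswith bs 'h' ['R','o','l'] 'l' (by decide)
        cases hP : PySem.Chars.endswith (bs ++ ['h']) ['P','i','t','c','h'] with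
        | true =>
          have hlen := pjn_endswith_len _ _ hP
          simp only [pjnRotLoopA, hR, hP, Bool.false_eq_true, if_false, if_true]
          rw [pjn_slice_strip _ _ hlen (by decide)]
        | false =>
          have hY : PySem.Chars.endswith (bs ++ ['h']) ['Y','a','w'] = false :=
            pjn_not_endswith bs 'h' ['Y','a'] 'w' (by decide)
          simp only [pjnRotLoopA, hR, hP, hY, Bool.false_eq_true, if_false]
          simp only [List.length_nil, Nat.cast_zero, sub_zero, Prod.mk.injEq]
          exact ⟨(pjn_slice_all _ _ le_rfl).symm, trivial⟩
      · by_cases hl : c = 'l'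
        · subst hl
          rw [show pjnRotByLast.getD ['l'] [] = ['R','o','l','l'] from by decide]
          cases hR : PySem.Chars.endswith (bs ++ ['l']) ['R','o','l','l'] with
          | true =>
            have hlen := pjn_endswith_len _ _ hR
            simp only [pjnRotLoopA, hR, if_true]
            rw [pjn_slice_strip _ _ hlen (by decide)]
          | false =>
            have hP : PySem.Chars.endswith (bs ++ ['l']) ['P','i','t','c','h'] = false :=
              pjn_not_endswith bs 'l' ['P','i','t','c'] 'h' (by decide)
            have hY : PySem.Chars.endswith (bs ++ ['l']) ['Y','a','w'] = false :=
              pjn_not_endswith bs 'l' ['Y','a'] 'w' (by decide)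
            simp only [pjnRotLoopA, hR, hP, hY, Bool.false_eq_true, if_false]
            simp only [List.length_nil, Nat.cast_zero, sub_zero, Prod.mk.injEq]
            exact ⟨(pjn_slice_all _ _ le_rfl).symm, trivial⟩
        · rw [show pjnRotByLast.getD [c] [] =
              (if c = 'w' then ['Y','a','w'] else if c = 'h' then ['P','i','t','c','h']
               else if c = 'l' then ['R','o','l','l'] else []) from by
            simp [pjnRotByLast, PySem.Dict.getD_insert]]
          simp only [if_neg hw, if_neg hh, if_neg hl]
          have hR : PySem.Chars.endswith (bs ++ [c]) ['R','o','l','l'] = false :=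
            pjn_not_endswith bs c ['R','o','l'] 'l' (fun h => hl h.symm)
          have hP : PySem.Chars.endswith (bs ++ [c]) ['P','i','t','c','h'] = false :=
            pjn_not_endswith bs c ['P','i','t','c'] 'h' (fun h => hh h.symm)
          have hY : PySem.Chars.endswith (bs ++ [c]) ['Y','a','w'] = false :=
            pjn_not_endswith bs c ['Y','a'] 'w' (fun h => hw h.symm)
          have hE : PySem.Chars.endswith (bs ++ [c]) [] = true := by
            rw [PySem.Chars.endswith_iff]; exact List.nil_suffix
          simp only [pjnRotLoopA, hR, hP, hY, hE, Bool.false_eq_true, if_false, if_true]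
          simp only [List.length_nil, Nat.cast_zero, sub_zero, Prod.mk.injEq]
          exact ⟨(pjn_slice_all _ _ le_rfl).symm, trivial⟩

-- the two side conditions are the same boolean
theorem pjn_cond_eq (cs : List Char) :
    (!cs.isEmpty &&
      (match cs with | c :: _ => c == 'R' || c == 'L' | [] => false) &&
      decide (1 < cs.length) &&
      (match PySem.List.pyGet? cs 1 with | some c => PySem.Chars.isupper c | none => false))
    =
    (decide (1 < cs.length) &&
      (match PySem.List.pyGet? cs 0 with | some c => c == 'R' || c == 'L' | none => false) &&
      (match PySem.List.pyGet? cs 1 with | some c => PySem.Chars.isupper c | none => false)) := by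
  match cs with
  | [] => rfl
  | [c] => simp [PySem.List.pyGet?]
  | c0 :: c1 :: t =>
    have h0 : PySem.List.pyGet? (c0 :: c1 :: t) (0 : Int) = some c0 := by
      simp [PySem.List.pyGet?_zero]
    have h1 : PySem.List.pyGet? (c0 :: c1 :: t) (1 : Int) = some c1 := by
      simp [PySem.List.pyGet?, PySem.List.pyIdx?]
    rw [h0, h1]
    simp [Bool.and_comm]

-- ===== VERDICT (by name: the statement is the Claim_ definition above) =====
theorem parse_joint_name_py_spec : Claim_equal_parse_joint_name_py := by
  intro name _
  unfold Spec_parse_joint_name_py parse_joint_name_py parse_joint_name_py_alt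
  simp only []
  rw [pjn_cond_eq]
  cases hb : (decide (1 < name.toList.length) &&
      (match PySem.List.pyGet? name.toList 0 with | some c => c == 'R' || c == 'L' | none => false) &&
      (match PySem.List.pyGet? name.toList 1 with | some c => PySem.Chars.isupper c | none => false)) with
  | true =>
    simp only [if_true]
    rw [pjn_rot_eq]
  | false =>
    simp only [Bool.false_eq_true, if_false]
    rw [pjn_rot_eq]
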